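-- pv_equiv track=rewrite | github.com/cms02snu/Algorithm | baekjoon/1495.py | solution
-- ===== SOURCE A (Python) =====
-- def solution(n,s,m,data):
--     table = [[False]*(m+1) for _ in range(n)]
--
--     for i in range(n):
--         for j in range(m+1):
--             if i==0:
--                 if j==s-data[0] or j==s+data[0]:
--                     table[0][j] = True
--             else:
--                 if 0<=j-data[i]<=m:
--                     if table[i-1][j-data[i]]:
--                         table[i][j] = True
--                 if 0<=j+data[i]<=m:
--                     if table[i-1][j+data[i]]:
--                         table[i][j] = True
--
--     for j in range(m,-1,-1):
--         if table[n-1][j]: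
--             return j
--
--     return -1
-- ===== SOURCE B (Python) =====
-- def solution(n, s, m, data):
--     # Bitset DP: the set of reachable volumes is one integer whose bit v means
--     # "volume v reachable"; each song shifts the whole set both ways in one
--     # word-parallel step instead of scanning volumes one by one.
--     if m < 0 or n < 1:
--         return -1
--     full = (1 << (m + 1)) - 1
--     d0 = abs(data[0])
--     mask = 0
--     for v in (s - d0, s + d0):
--         if 0 <= v <= m:
--             mask |= 1 << v
--     for d in data[1:n]:
--         sh = min(abs(d), m + 1)
--         mask = ((mask << sh) | (mask >> sh)) & full
--     return mask.bit_length() - 1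
-- ===== Notes on version B (the rewrite author's own statement) =====
-- stated objective: faster
-- what changed: B encodes the whole set of reachable volumes as the bits of one big integer and advances it per song with two shifts, an OR and a mask ((mask<<d)|(mask>>d))&full, reading the answer as bit_length()-1, instead of A's n x (m+1) boolean table filled entry-by-entry with per-cell bound checks and scanned downwards.
import Mathlib
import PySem

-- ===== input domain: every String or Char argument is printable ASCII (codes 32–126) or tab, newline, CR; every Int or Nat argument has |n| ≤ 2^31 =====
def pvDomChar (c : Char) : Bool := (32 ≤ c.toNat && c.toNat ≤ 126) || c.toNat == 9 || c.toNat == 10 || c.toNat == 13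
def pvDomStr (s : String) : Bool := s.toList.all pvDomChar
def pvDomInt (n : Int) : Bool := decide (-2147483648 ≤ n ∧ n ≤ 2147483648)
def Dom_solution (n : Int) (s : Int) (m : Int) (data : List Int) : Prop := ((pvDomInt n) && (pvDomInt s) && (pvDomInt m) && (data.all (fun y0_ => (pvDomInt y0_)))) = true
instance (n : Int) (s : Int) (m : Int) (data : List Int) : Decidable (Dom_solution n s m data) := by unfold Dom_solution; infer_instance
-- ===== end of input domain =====

-- B replaces A's n×(m+1) boolean table (filled cell-by-cell, then scanned downwards) by a bitset:
-- the reachable volumes are the set bits of one natural number, advanced per song with two shifts,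
-- an OR and a mask; the answer is read off as bit_length() - 1.
-- ===== PORT A =====
-- table[i][j] read (Python table[i][j], nonneg indices in all executed reads)
def tgetA (t : List (List Bool)) (i j : Int) : Bool :=
  PySem.List.pyGetD (PySem.List.pyGetD t i []) j false

-- table[i][j] = True (Python in-place assignment; indices are nonnegative at every call site)
def tsetA (t : List (List Bool)) (i j : Int) : List (List Bool) :=
  t.set i.toNat ((PySem.List.pyGetD t i []).set j.toNat true)

def solution (n : Int) (s : Int) (m : Int) (data : List Int) : Int :=
  let table0 : List (List Bool) :=
    (PySem.List.pyRange 0 n 1).map (fun _ => List.replicate (m + 1).toNat false)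
  let table :=
    (PySem.List.pyRange 0 n 1).foldl (fun tb i =>
      (PySem.List.pyRange 0 (m + 1) 1).foldl (fun tb j =>
        if i = 0 then
          if j = s - PySem.List.pyGetD data 0 0 ∨ j = s + PySem.List.pyGetD data 0 0 then
            tsetA tb 0 j
          else tb
        else
          let tb1 :=
            if 0 ≤ j - PySem.List.pyGetD data i 0 ∧ j - PySem.List.pyGetD data i 0 ≤ m then
              if tgetA tb (i - 1) (j - PySem.List.pyGetD data i 0) then tsetA tb i j else tb
            else tb
          if 0 ≤ j + PySem.List.pyGetD data i 0 ∧ j + PySem.List.pyGetD data i 0 ≤ m then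
            if tgetA tb1 (i - 1) (j + PySem.List.pyGetD data i 0) then tsetA tb1 i j else tb1
          else tb1) tb) table0
  match (PySem.List.pyRange m (-1) (-1)).foldl (fun acc j =>
      match acc with
      | some r => some r
      | none => if tgetA table (n - 1) j then some j else none) none with
  | some j => j
  | none => -1

-- ===== PORT B =====
def solution_alt (n : Int) (s : Int) (m : Int) (data : List Int) : Int :=
  if m < 0 ∨ n < 1 then -1
  else
    let full : Nat := (1 <<< (m + 1).toNat) - 1
    let d0 : Int := ((PySem.List.pyGetD data 0 0).natAbs : Int)
    let mask0 : Nat := [s - d0, s + d0].foldl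
      (fun mk v => if 0 ≤ v ∧ v ≤ m then mk ||| (1 <<< v.toNat) else mk) 0
    let mask : Nat := (PySem.List.slice data (some 1) (some n)).foldl
      (fun mk d =>
        ((mk <<< min d.natAbs (m + 1).toNat) ||| (mk >>> min d.natAbs (m + 1).toNat)) &&& full)
      mask0
    (mask.size : Int) - 1

-- ===== PRECONDITION & SPEC =====
-- Pre_ excludes exactly the inputs on which A raises IndexError: m ≥ 0 with n ≤ 0 (table[-1] on the
-- empty table) or m ≥ 0 with fewer than n entries in data (data[i] out of range).
def Pre_solution (n : Int) (s : Int) (m : Int) (data : List Int) : Prop :=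
  m < 0 ∨ (1 ≤ n ∧ n ≤ (data.length : Int))
instance (n : Int) (s : Int) (m : Int) (data : List Int) : Decidable (Pre_solution n s m data) := by
  unfold Pre_solution; infer_instance

def pvWitness_solution : Int × Int × Int × List Int := (2, 3, 5, [1, 2])

def Spec_solution (n : Int) (s : Int) (m : Int) (data : List Int) (out : Int) : Prop := out = solution_alt n s m data
instance (n : Int) (s : Int) (m : Int) (data : List Int) (out : Int) : Decidable (Spec_solution n s m data out) := by unfold Spec_solution; infer_instance

-- ===== CLAIM (what is proved, stated in full; the proofs are below) =====
def Claim_equal_solution : Prop := ∀ (n : Int) (s : Int) (m : Int) (data : List Int), Dom_solution n s m data → Pre_solution n s m data → Spec_solution n s m data (solution n s m data)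

-- ===== LEMMAS AND PROOFS =====

-- the per-song frontier step (what one song does to the set of reachable volumes)
def stepB (m : Int) (cur : List Int) (d : Int) : List Int :=
  cur.foldl (fun nxt v =>
    [v - d, v + d].foldl (fun nxt w =>
      if 0 ≤ w ∧ w ≤ m then PySem.Set.add nxt w else nxt) nxt)
    PySem.Set.empty

-- frontier after k songs, songs taken as data[0], data[1], …
def Fr (s m : Int) (data : List Int) : Nat → List Int
  | 0 => [s]
  | k + 1 => stepB m (Fr s m data k) (data.getD k 0)

theorem mem_stepB_aux (m d w : Int) (cur acc : List Int) :
    w ∈ cur.foldl (fun nxt v =>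
        [v - d, v + d].foldl (fun nxt w =>
          if 0 ≤ w ∧ w ≤ m then PySem.Set.add nxt w else nxt) nxt) acc ↔
      w ∈ acc ∨ ((0 ≤ w ∧ w ≤ m) ∧ ∃ v ∈ cur, w = v - d ∨ w = v + d) := by
  induction cur generalizing acc with
  | nil => simp
  | cons v cur ih =>
    rw [List.foldl_cons, ih]
    have hstep : ∀ x : List Int, w ∈ (if 0 ≤ v + d ∧ v + d ≤ m then
          PySem.Set.add (if 0 ≤ v - d ∧ v - d ≤ m then PySem.Set.add x (v - d) else x) (v + d)
        else (if 0 ≤ v - d ∧ v - d ≤ m then PySem.Set.add x (v - d) else x)) ↔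
        w ∈ x ∨ ((0 ≤ w ∧ w ≤ m) ∧ (w = v - d ∨ w = v + d)) := by
      intro x
      by_cases hx : w ∈ x <;> split_ifs with h1 h2 h2 <;>
        simp [PySem.Set.mem_add, hx] <;> omega
    rw [List.foldl_cons, List.foldl_cons, List.foldl_nil]
    rw [hstep]
    constructor
    · rintro ((h | h) | h)
      · exact Or.inl h
      · exact Or.inr ⟨h.1, v, by simp, h.2⟩
      · exact Or.inr ⟨h.1, by obtain ⟨u, hu, hw⟩ := h.2; exact ⟨u, by simp [hu], hw⟩⟩
    · rintro (h | ⟨hb, u, hu, hw⟩)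
      · exact Or.inl (Or.inl h)
      · rcases List.mem_cons.mp hu with rfl | hu
        · exact Or.inl (Or.inr ⟨hb, hw⟩)
        · exact Or.inr ⟨hb, u, hu, hw⟩

theorem mem_stepB (m d w : Int) (cur : List Int) :
    w ∈ stepB m cur d ↔ ((0 ≤ w ∧ w ≤ m) ∧ ∃ v ∈ cur, w = v - d ∨ w = v + d) := by
  unfold stepB
  rw [mem_stepB_aux]
  simp [PySem.Set.empty]

theorem Fr_bounds (s m : Int) (data : List Int) (k : Nat) (hk : 1 ≤ k) :
    ∀ w ∈ Fr s m data k, 0 ≤ w ∧ w ≤ m := by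
  intro w hw
  cases k with
  | zero => omega
  | succ k => exact ((mem_stepB _ _ _ _).mp hw).1

-- the fold over data[:k] of the frontier step is Fr
theorem foldl_take_eq_Fr (s m : Int) (data : List Int) :
    ∀ k : Nat, k ≤ data.length →
      (data.take k).foldl (stepB m) (PySem.Set.ofList [s]) = Fr s m data k := by
  intro k
  induction k with
  | zero => intro _; rfl
  | succ k ih =>
    intro hk
    have hkl : k < data.length := by omega
    rw [List.take_add_one, List.getElem?_eq_getElem hkl]
    rw [show (some data[k]).toList = [data[k]] from rfl]
    rw [List.foldl_append, ih (by omega)]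
    show stepB m (Fr s m data k) data[k] = Fr s m data (k + 1)
    rw [show data[k] = data.getD k 0 from (List.getD_eq_getElem data 0 hkl).symm]
    rfl

-- ---- A-side: tget/tset mechanics ----
theorem tgetA_nonneg (t : List (List Bool)) (i j : Int) (hi : 0 ≤ i) (hj : 0 ≤ j) :
    tgetA t i j = (t.getD i.toNat []).getD j.toNat false := by
  unfold tgetA
  rw [PySem.List.pyGetD_of_nonneg _ _ hi, PySem.List.pyGetD_of_nonneg _ _ hj]

theorem length_tsetA (t : List (List Bool)) (i j : Int) : (tsetA t i j).length = t.length := by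
  unfold tsetA; simp

theorem rows_tsetA (t : List (List Bool)) (i j : Int) (L : Nat) (hi : 0 ≤ i)
    (hit : i.toNat < t.length)
    (h : ∀ r ∈ t, r.length = L) : ∀ r ∈ tsetA t i j, r.length = L := by
  intro r hr
  rcases List.mem_or_eq_of_mem_set hr with hr' | hr'
  · exact h r hr'
  · subst hr'
    rw [PySem.List.pyGetD_of_nonneg _ _ hi, List.getD_eq_getElem t [] hit]
    simp [h _ (List.getElem_mem hit)]

theorem tgetA_tsetA_ne_row (t : List (List Bool)) (i j i' j' : Int)
    (hi : 0 ≤ i) (hi' : 0 ≤ i') (hne : i' ≠ i) :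
    tgetA (tsetA t i j) i' j' = tgetA t i' j' := by
  unfold tgetA tsetA
  rw [PySem.List.pyGetD_of_nonneg _ _ hi', PySem.List.pyGetD_of_nonneg _ _ hi']
  congr 1
  simp [List.getD, List.getElem?_set_ne (show i.toNat ≠ i'.toNat by omega)]

theorem tgetA_tsetA_ne_col (t : List (List Bool)) (i j j' : Int)
    (hi : 0 ≤ i) (hj : 0 ≤ j) (hj' : 0 ≤ j') (hne : j' ≠ j) :
    tgetA (tsetA t i j) i j' = tgetA t i j' := by
  rw [tgetA_nonneg _ _ _ hi hj', tgetA_nonneg _ _ _ hi hj']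
  unfold tsetA
  rw [PySem.List.pyGetD_of_nonneg _ _ hi]
  by_cases hit : i.toNat < t.length
  · simp [List.getD, hit, List.getElem?_set_ne (show j.toNat ≠ j'.toNat by omega)]
  · rw [List.set_eq_of_length_le (by omega)]

theorem tgetA_tsetA_self (t : List (List Bool)) (i j : Int)
    (hi : 0 ≤ i) (hit : i.toNat < t.length) (hj : 0 ≤ j)
    (hjt : j.toNat < (t.getD i.toNat []).length) :
    tgetA (tsetA t i j) i j = true := by
  rw [tgetA_nonneg _ _ _ hi hj]
  unfold tsetA
  rw [PySem.List.pyGetD_of_nonneg _ _ hi]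
  rw [List.getD_eq_getElem t [] hit] at hjt ⊢
  simp [List.getD, hit, hjt]

-- the Bool condition under which A writes True at (i, j) (reads only row i-1 of T)
def writeCond (s m : Int) (data : List Int) (T : List (List Bool)) (i j : Int) : Bool :=
  if i = 0 then
    decide (j = s - PySem.List.pyGetD data 0 0 ∨ j = s + PySem.List.pyGetD data 0 0)
  else
    (decide (0 ≤ j - PySem.List.pyGetD data i 0 ∧ j - PySem.List.pyGetD data i 0 ≤ m) &&
       tgetA T (i - 1) (j - PySem.List.pyGetD data i 0)) ||
    (decide (0 ≤ j + PySem.List.pyGetD data i 0 ∧ j + PySem.List.pyGetD data i 0 ≤ m) &&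
       tgetA T (i - 1) (j + PySem.List.pyGetD data i 0))

-- the inner (j-) loop body of port A
def bodyA (s m : Int) (data : List Int) (i : Int) (tb : List (List Bool)) (j : Int) :
    List (List Bool) :=
  if i = 0 then
    if j = s - PySem.List.pyGetD data 0 0 ∨ j = s + PySem.List.pyGetD data 0 0 then
      tsetA tb 0 j
    else tb
  else
    let tb1 :=
      if 0 ≤ j - PySem.List.pyGetD data i 0 ∧ j - PySem.List.pyGetD data i 0 ≤ m then
        if tgetA tb (i - 1) (j - PySem.List.pyGetD data i 0) then tsetA tb i j else tb
      else tb
    if 0 ≤ j + PySem.List.pyGetD data i 0 ∧ j + PySem.List.pyGetD data i 0 ≤ m then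
      if tgetA tb1 (i - 1) (j + PySem.List.pyGetD data i 0) then tsetA tb1 i j else tb1
    else tb1

theorem stepSet (L : Nat) (T : List (List Bool)) (i j : Int) (c : Prop) [Decidable c] (b : Bool)
    (hi : 0 ≤ i) (hiT : i.toNat < T.length) (hrows : ∀ r ∈ T, r.length = L)
    (hj : 0 ≤ j) (hjL : j.toNat < L) :
    (if c then (if b then tsetA T i j else T) else T).length = T.length ∧
    (∀ r ∈ (if c then (if b then tsetA T i j else T) else T), r.length = L) ∧
    (∀ i' j' : Int, 0 ≤ i' → i' ≠ i →
      tgetA (if c then (if b then tsetA T i j else T) else T) i' j' = tgetA T i' j') ∧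
    (∀ j' : Int, 0 ≤ j' →
      tgetA (if c then (if b then tsetA T i j else T) else T) i j' =
        (tgetA T i j' || (decide (j' = j) && (decide c && b)))) := by
  have hrowlen : (T.getD i.toNat []).length = L := by
    rw [List.getD_eq_getElem T [] hiT]; exact hrows _ (List.getElem_mem hiT)
  by_cases hc : c
  · cases b with
    | false =>
      have hR : (if c then (if (false : Bool) then tsetA T i j else T) else T) = T := by simp
      rw [hR]
      exact ⟨rfl, hrows, fun _ _ _ _ => rfl, fun j' _ => by simp⟩
    | true =>
      have hR : (if c then (if (true : Bool) then tsetA T i j else T) else T) = tsetA T i j := by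
        simp [hc]
      rw [hR]
      refine ⟨length_tsetA T i j, rows_tsetA T i j L hi hiT hrows,
        fun i' j' hi' hne => tgetA_tsetA_ne_row T i j i' j' hi hi' hne, fun j' hj' => ?_⟩
      by_cases hjj : j' = j
      · rw [hjj]
        rw [tgetA_tsetA_self T i j hi hiT hj (by rw [hrowlen]; exact hjL)]
        simp [hc]
      · rw [tgetA_tsetA_ne_col T i j j' hi hj hj' hjj]
        simp [hjj]
  · have hR : (if c then (if b then tsetA T i j else T) else T) = T := by simp [hc]
    rw [hR]
    exact ⟨rfl, hrows, fun _ _ _ _ => rfl, fun j' _ => by simp [hc]⟩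

theorem writeCond_congr (s m : Int) (data : List Int) (i : Int) (hi : 0 ≤ i)
    (T T' : List (List Bool))
    (h : ∀ i' j' : Int, 0 ≤ i' → i' ≠ i → tgetA T' i' j' = tgetA T i' j') :
    ∀ j' : Int, writeCond s m data T' i j' = writeCond s m data T i j' := by
  intro j'
  unfold writeCond
  by_cases hi0 : i = 0
  · simp [hi0]
  · simp only [if_neg hi0]
    rw [h (i - 1) _ (by omega) (by omega), h (i - 1) _ (by omega) (by omega)]

theorem bodyA_props (s m : Int) (data : List Int) (L : Nat) (i j : Int) (hi : 0 ≤ i)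
    (T : List (List Bool)) (hiT : i.toNat < T.length)
    (hrows : ∀ r ∈ T, r.length = L) (hj : 0 ≤ j) (hjL : j.toNat < L) :
    (bodyA s m data i T j).length = T.length ∧
    (∀ r ∈ bodyA s m data i T j, r.length = L) ∧
    (∀ i' j' : Int, 0 ≤ i' → i' ≠ i →
      tgetA (bodyA s m data i T j) i' j' = tgetA T i' j') ∧
    (∀ j' : Int, 0 ≤ j' →
      tgetA (bodyA s m data i T j) i j' =
        (tgetA T i j' || (decide (j' = j) && writeCond s m data T i j'))) := by
  unfold bodyA writeCond
  by_cases hi0 : i = 0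
  · subst hi0
    have h := stepSet L T 0 j (j = s - PySem.List.pyGetD data 0 0 ∨ j = s + PySem.List.pyGetD data 0 0)
      true hi hiT hrows hj hjL
    simp only [eq_self_iff_true, if_true] at h ⊢
    refine ⟨h.1, h.2.1, h.2.2.1, fun j' hj' => ?_⟩
    rw [h.2.2.2 j' hj']
    by_cases hjj : j' = j
    · subst hjj; rw [Bool.and_true]
    · simp [hjj]
  · simp only [if_neg hi0]
    have h1 := stepSet L T i j
      (0 ≤ j - PySem.List.pyGetD data i 0 ∧ j - PySem.List.pyGetD data i 0 ≤ m)
      (tgetA T (i - 1) (j - PySem.List.pyGetD data i 0)) hi hiT hrows hj hjL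
    set tb1 := if 0 ≤ j - PySem.List.pyGetD data i 0 ∧ j - PySem.List.pyGetD data i 0 ≤ m then
        (if tgetA T (i - 1) (j - PySem.List.pyGetD data i 0) then tsetA T i j else T) else T with htb1
    obtain ⟨h1len, h1rows, h1ne, h1row⟩ := h1
    have hread : tgetA tb1 (i - 1) (j + PySem.List.pyGetD data i 0) =
        tgetA T (i - 1) (j + PySem.List.pyGetD data i 0) :=
      h1ne (i - 1) _ (by omega) (by omega)
    have h2 := stepSet L tb1 i j
      (0 ≤ j + PySem.List.pyGetD data i 0 ∧ j + PySem.List.pyGetD data i 0 ≤ m)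
      (tgetA tb1 (i - 1) (j + PySem.List.pyGetD data i 0)) hi (by omega) h1rows hj hjL
    obtain ⟨h2len, h2rows, h2ne, h2row⟩ := h2
    refine ⟨by omega, h2rows, ?_, ?_⟩
    · intro i' j' hi' hne
      rw [h2ne i' j' hi' hne, h1ne i' j' hi' hne]
    · intro j' hj'
      rw [h2row j' hj', h1row j' hj', hread]
      by_cases hjj : j' = j
      · subst hjj
        rw [Bool.and_or_distrib_left (decide (j' = j')), ← Bool.or_assoc]
      · simp [hjj]

theorem innerA (s m : Int) (data : List Int) (N L : Nat) (i : Int) (hi : 0 ≤ i)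
    (hiN : i.toNat < N) :
    ∀ (js : List Int) (T : List (List Bool)),
      (∀ j ∈ js, 0 ≤ j ∧ j.toNat < L) →
      T.length = N → (∀ r ∈ T, r.length = L) →
      (js.foldl (bodyA s m data i) T).length = N ∧
      (∀ r ∈ js.foldl (bodyA s m data i) T, r.length = L) ∧
      (∀ i' j' : Int, 0 ≤ i' → i' ≠ i →
        tgetA (js.foldl (bodyA s m data i) T) i' j' = tgetA T i' j') ∧
      (∀ j' : Int, 0 ≤ j' →
        tgetA (js.foldl (bodyA s m data i) T) i j' =
          (tgetA T i j' || (js.contains j' && writeCond s m data T i j'))) := by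
  intro js
  induction js with
  | nil => intro T _ hT hrows; exact ⟨hT, hrows, fun _ _ _ _ => rfl, fun j' _ => by simp⟩
  | cons j js ih =>
    intro T hjs hT hrows
    obtain ⟨hj, hjL⟩ := hjs j (by simp)
    have hb := bodyA_props s m data L i j hi T (by omega) hrows hj hjL
    obtain ⟨hblen, hbrows, hbne, hbrow⟩ := hb
    have hIH := ih (bodyA s m data i T j) (fun j' hj' => hjs j' (by simp [hj']))
      (by omega) hbrows
    obtain ⟨hlen, hrows', hne, hrow⟩ := hIH
    have hwc := writeCond_congr s m data i hi T (bodyA s m data i T j) hbne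
    rw [List.foldl_cons]
    refine ⟨hlen, hrows', ?_, ?_⟩
    · intro i' j' hi' hne'
      rw [hne i' j' hi' hne', hbne i' j' hi' hne']
    · intro j' hj'
      rw [hrow j' hj', hbrow j' hj', hwc j']
      by_cases hjj : j' = j
      · subst hjj
        simp only [List.contains_cons, BEq.rfl, Bool.true_or, decide_true, Bool.true_and]
        cases tgetA T i j' <;> cases writeCond s m data T i j' <;>
          cases js.contains j' <;> rfl
      · have hb' : (j' == j) = false := by simp [hjj]
        simp only [List.contains_cons, hb', Bool.false_or, decide_eq_false hjj,
          Bool.false_and, Bool.or_false]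

-- the outer (i-) loop: table after the first k outer iterations
def tableK (s m n : Int) (data : List Int) (k : Nat) : List (List Bool) :=
  (PySem.List.pyRange 0 (k : Int) 1).foldl
    (fun tb i => (PySem.List.pyRange 0 (m + 1) 1).foldl (bodyA s m data i) tb)
    ((PySem.List.pyRange 0 n 1).map (fun _ => List.replicate (m + 1).toNat false))

theorem outerA (s m : Int) (data : List Int) (n : Int) (hn : 1 ≤ n)
    (hlen : n ≤ (data.length : Int)) :
    ∀ k : Nat, k ≤ n.toNat →
      (tableK s m n data k).length = n.toNat ∧
      (∀ r ∈ tableK s m n data k, r.length = (m + 1).toNat) ∧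
      (∀ i : Nat, i < k → ∀ j : Int, 0 ≤ j → j ≤ m →
        (tgetA (tableK s m n data k) (i : Int) j = true ↔ j ∈ Fr s m data (i + 1))) ∧
      (∀ i : Nat, k ≤ i → ∀ j : Int, 0 ≤ j → tgetA (tableK s m n data k) (i : Int) j = false) := by
  intro k
  induction k with
  | zero =>
    intro _
    have h0 : tableK s m n data 0 =
        (PySem.List.pyRange 0 n 1).map (fun _ => List.replicate (m + 1).toNat false) := by
      unfold tableK
      rw [show ((0 : Nat) : Int) = 0 from rfl, PySem.List.pyRange_one_eq_nil (le_refl 0)]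
      rfl
    rw [h0]
    refine ⟨by simp [PySem.List.length_pyRange_one], ?_, by omega, ?_⟩
    · intro r hr
      obtain ⟨_, _, rfl⟩ := List.mem_map.mp hr
      simp
    · intro i _ j hj
      rw [tgetA_nonneg _ _ _ (by positivity) hj]
      by_cases hi : ((i : Int)).toNat < ((PySem.List.pyRange 0 n 1).map
          (fun _ => List.replicate (m + 1).toNat false)).length
      · rw [List.getD_eq_getElem _ [] hi]
        rw [List.getElem_map]
        simp [List.getD]
      · rw [List.getD_eq_default _ [] (by omega)]
        rfl
  | succ k ih =>
    intro hk1
    obtain ⟨ihlen, ihrows, ih3, ih4⟩ := ih (by omega)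
    have hsplit : tableK s m n data (k + 1) =
        (PySem.List.pyRange 0 (m + 1) 1).foldl (bodyA s m data (k : Int)) (tableK s m n data k) := by
      unfold tableK
      rw [show ((k + 1 : Nat) : Int) = (k : Int) + 1 by push_cast; ring]
      rw [PySem.List.pyRange_one_succ_right (a := 0) (b := (k : Int)) (by omega),
        List.foldl_append]
      rfl
    have hinner := innerA s m data n.toNat (m + 1).toNat (k : Int) (by positivity)
      (by simpa using hk1) (PySem.List.pyRange 0 (m + 1) 1) (tableK s m n data k)
      (fun j hj => by
        have := PySem.List.mem_pyRange_one.mp hj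
        omega) ihlen ihrows
    obtain ⟨hlen', hrows', hne', hrow'⟩ := hinner
    rw [hsplit]
    refine ⟨hlen', hrows', ?_, ?_⟩
    · intro i hik j hj0 hjm
      by_cases hik' : i < k
      · rw [hne' (i : Int) j (by positivity) (by omega)]
        exact ih3 i hik' j hj0 hjm
      · have hik2 : i = k := by omega
        rw [hik2]
        rw [hrow' j hj0, ih4 k (le_refl k) j hj0]
        have hcont : (PySem.List.pyRange 0 (m + 1) 1).contains j = true := by
          have : j ∈ PySem.List.pyRange 0 (m + 1) 1 := PySem.List.mem_pyRange_one.mpr ⟨hj0, by omega⟩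
          exact List.elem_eq_true_of_mem this
        rw [hcont]
        simp only [Bool.false_or, Bool.true_and]
        -- writeCond ↔ membership in the next frontier
        unfold writeCond
        cases k with
        | zero =>
          rw [if_pos (show ((0 : Nat) : Int) = 0 by simp)]
          rw [show Fr s m data (0 + 1) = stepB m [s] (data.getD 0 0) from rfl]
          rw [mem_stepB, PySem.List.pyGetD_zero]
          simp only [decide_eq_true_iff, List.mem_singleton]
          constructor
          · intro h
            exact ⟨⟨hj0, hjm⟩, s, rfl, by omega⟩
          · rintro ⟨_, v, rfl, h⟩
            omega
        | succ k' =>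
          rw [if_neg (show ¬((k' + 1 : Nat) : Int) = 0 by omega)]
          have hcast1 : ((k' + 1 : Nat) : Int) - 1 = (k' : Int) := by push_cast; ring
          have hdk : PySem.List.pyGetD data ((k' + 1 : Nat) : Int) 0 = data.getD (k' + 1) 0 :=
            PySem.List.pyGetD_natCast data (k' + 1) 0
          rw [hcast1]
          rw [show Fr s m data (k' + 1 + 1) = stepB m (Fr s m data (k' + 1)) (data.getD (k' + 1) 0) from rfl]
          rw [mem_stepB]
          set d := data.getD (k' + 1) 0 with hd
          rw [hdk]
          simp only [Bool.or_eq_true, Bool.and_eq_true, decide_eq_true_iff]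
          constructor
          · rintro (⟨hb, hrow⟩ | ⟨hb, hrow⟩)
            · have hmem := (ih3 k' (by omega) (j - d) (by omega) (by omega)).mp hrow
              exact ⟨⟨hj0, hjm⟩, j - d, hmem, by omega⟩
            · have hmem := (ih3 k' (by omega) (j + d) (by omega) (by omega)).mp hrow
              exact ⟨⟨hj0, hjm⟩, j + d, hmem, by omega⟩
          · rintro ⟨_, v, hv, hcase⟩
            have hvb := Fr_bounds s m data (k' + 1) (by omega) v hv
            rcases hcase with h | h
            · right
              refine ⟨by omega, ?_⟩
              have : j + d = v := by omega
              rw [this]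
              exact (ih3 k' (by omega) v (by omega) (by omega)).mpr hv
            · left
              refine ⟨by omega, ?_⟩
              have : j - d = v := by omega
              rw [this]
              exact (ih3 k' (by omega) v (by omega) (by omega)).mpr hv
    · intro i hik j hj0
      rw [hne' (i : Int) j (by positivity) (by omega)]
      exact ih4 i (by omega) j hj0

theorem foldl_scan_some {α β : Type} (f : Option α → β → Option α)
    (h : ∀ (r : α) (a : β), f (some r) a = some r) :
    ∀ (js : List β) (r : α), js.foldl f (some r) = some r := by
  intro js
  induction js with
  | nil => intro r; rfl
  | cons j js ih => intro r; rw [List.foldl_cons, h]; exact ih r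

theorem scan_eq_find (p : Int → Bool) (js : List Int) :
    js.foldl (fun acc j =>
      match acc with
      | some r => some r
      | none => if p j then some j else none) none = js.find? p := by
  induction js with
  | nil => rfl
  | cons j js ih =>
    rw [List.foldl_cons, List.find?_cons]
    cases hp : p j with
    | true => exact foldl_scan_some _ (fun r a => rfl) js j
    | false => exact ih

theorem desc_find_aux (p : Int → Bool) :
    ∀ (K : Nat) (m : Int), m < K →
    ((PySem.List.pyRange m (-1) (-1)).find? p).elim
      (∀ j : Int, 0 ≤ j → j ≤ m → p j = false)
      (fun j => p j = true ∧ 0 ≤ j ∧ j ≤ m ∧ ∀ j' : Int, j < j' → j' ≤ m → p j' = false) := by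
  intro K
  induction K with
  | zero =>
    intro m hm
    rw [PySem.List.pyRange_neg_one_eq_nil (by omega)]
    simp only [List.find?_nil, Option.elim]
    intro j h1 h2; omega
  | succ K ih =>
    intro m hm
    by_cases hm0 : m < 0
    · rw [PySem.List.pyRange_neg_one_eq_nil (by omega)]
      simp only [List.find?_nil, Option.elim]
      intro j h1 h2; omega
    · rw [PySem.List.pyRange_neg_one_cons (by omega : (-1 : Int) < m), List.find?_cons]
      cases hp : p m with
      | true =>
        simp only [Option.elim]
        exact ⟨hp, by omega, le_refl m, fun j' h1 h2 => by omega⟩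
      | false =>
        simp only
        have h := ih (m - 1) (by omega)
        cases hfind : (PySem.List.pyRange (m - 1) (-1) (-1)).find? p with
        | none =>
          rw [hfind] at h
          simp only [Option.elim] at h ⊢
          intro j h1 h2
          by_cases hjm : j = m
          · subst hjm; exact hp
          · exact h j h1 (by omega)
        | some j =>
          rw [hfind] at h
          simp only [Option.elim] at h ⊢
          refine ⟨h.1, h.2.1, by omega, fun j' h1 h2 => ?_⟩
          by_cases hjm : j' = m
          · subst hjm; exact hp
          · exact h.2.2.2 j' h1 (by omega)

theorem desc_find (p : Int → Bool) (m : Int) :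
    ((PySem.List.pyRange m (-1) (-1)).find? p).elim
      (∀ j : Int, 0 ≤ j → j ≤ m → p j = false)
      (fun j => p j = true ∧ 0 ≤ j ∧ j ≤ m ∧ ∀ j' : Int, j < j' → j' ≤ m → p j' = false) := by
  exact desc_find_aux p (m.toNat + 1) m (by omega)

-- A returns -1 whenever m < 0: the final downward scan is over an empty range
theorem solution_m_neg (n s m : Int) (data : List Int) (hm : m < 0) :
    solution n s m data = -1 := by
  unfold solution
  show (match (PySem.List.pyRange m (-1) (-1)).foldl
      (fun acc j => match acc with
        | some r => some r
        | none => if tgetA ((PySem.List.pyRange 0 n 1).foldl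
            (fun tb i => (PySem.List.pyRange 0 (m + 1) 1).foldl (bodyA s m data i) tb)
            ((PySem.List.pyRange 0 n 1).map (fun _ => List.replicate (m + 1).toNat false)))
            (n - 1) j then some j else none) none with
    | some j => j | none => -1) = -1
  rw [PySem.List.pyRange_neg_one_eq_nil (by omega)]
  rfl

-- ---- B-side: bit-level lemmas ----

-- adding one candidate volume to the bitset
theorem testBit_addBit (mk : Nat) (m v : Int) (j : Nat) :
    ((if 0 ≤ v ∧ v ≤ m then mk ||| (1 <<< v.toNat) else mk).testBit j = true) ↔
      (mk.testBit j = true ∨ (0 ≤ v ∧ v ≤ m ∧ (j : Int) = v)) := by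
  split_ifs with h
  · rw [Nat.shiftLeft_eq, one_mul, Nat.testBit_or, Bool.or_eq_true, Nat.testBit_two_pow]
    constructor
    · rintro (hb | hb)
      · exact Or.inl hb
      · exact Or.inr ⟨h.1, h.2, by have := of_decide_eq_true hb; omega⟩
    · rintro (hb | ⟨_, _, hv⟩)
      · exact Or.inl hb
      · exact Or.inr (decide_eq_true (by omega))
  · constructor
    · exact Or.inl
    · rintro (hb | hb)
      · exact hb
      · exact absurd ⟨hb.1, hb.2.1⟩ h

-- bits of the initial mask (song 0) = the first frontier
theorem testBit_mask0 (s m d : Int) (j : Nat) :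
    (([s - ((d.natAbs : Nat) : Int), s + ((d.natAbs : Nat) : Int)].foldl
        (fun mk v => if 0 ≤ v ∧ v ≤ m then mk ||| (1 <<< v.toNat) else mk) 0).testBit j = true) ↔
      (j : Int) ∈ stepB m [s] d := by
  rw [List.foldl_cons, List.foldl_cons, List.foldl_nil, testBit_addBit, testBit_addBit,
    mem_stepB]
  simp only [Nat.zero_testBit, Bool.false_eq_true, false_or, List.mem_singleton,
    exists_eq_left]
  omega

-- one word-parallel shift step has exactly the bits of one frontier step
theorem testBit_maskStep (m : Int) (hm : 0 ≤ m) (mk : Nat) (F : List Int) (d : Int)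
    (hF : ∀ v ∈ F, 0 ≤ v ∧ v ≤ m)
    (hmk : ∀ j : Nat, mk.testBit j = true ↔ (j : Int) ∈ F) (j : Nat) :
    ((((mk <<< min d.natAbs (m + 1).toNat) ||| (mk >>> min d.natAbs (m + 1).toNat)) &&&
        ((1 <<< (m + 1).toNat) - 1)).testBit j = true) ↔ (j : Int) ∈ stepB m F d := by
  rw [mem_stepB]
  rw [Nat.testBit_and, Nat.testBit_or, Nat.testBit_shiftLeft, Nat.testBit_shiftRight]
  have hfull : ((1 <<< (m + 1).toNat) - 1).testBit j = decide (j < (m + 1).toNat) := by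
    rw [Nat.shiftLeft_eq, one_mul]
    exact Nat.testBit_two_pow_sub_one (m + 1).toNat j
  rw [hfull]
  simp only [Bool.and_eq_true, Bool.or_eq_true, decide_eq_true_iff]
  constructor
  · rintro ⟨hb | hb, hj⟩
    · have hsh : min d.natAbs (m + 1).toNat ≤ j := hb.1
      have hv := (hmk (j - min d.natAbs (m + 1).toNat)).mp hb.2
      have hvb := hF _ hv
      exact ⟨⟨by omega, by omega⟩, _, hv, by omega⟩
    · have hv := (hmk (min d.natAbs (m + 1).toNat + j)).mp hb
      have hvb := hF _ hv
      exact ⟨⟨by omega, by omega⟩, _, hv, by omega⟩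
  · rintro ⟨⟨hj0, hjm⟩, v, hv, hcase⟩
    have hvb := hF v hv
    refine ⟨?_, by omega⟩
    by_cases hle : v ≤ (j : Int)
    · left
      have hsh : min d.natAbs (m + 1).toNat ≤ j ∧
          ((j - min d.natAbs (m + 1).toNat : Nat) : Int) = v := by omega
      refine ⟨by omega, (hmk _).mpr ?_⟩
      rw [hsh.2]; exact hv
    · right
      have hsh : ((min d.natAbs (m + 1).toNat + j : Nat) : Int) = v := by omega
      refine (hmk _).mpr ?_
      rw [hsh]; exact hv

-- folding the word-parallel step keeps the bits = frontier invariant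
theorem testBit_foldl_mask (m : Int) (hm : 0 ≤ m) :
    ∀ (t : List Int) (mk : Nat) (F : List Int),
      (∀ v ∈ F, 0 ≤ v ∧ v ≤ m) →
      (∀ j : Nat, mk.testBit j = true ↔ (j : Int) ∈ F) →
      ∀ j : Nat,
        ((t.foldl (fun mk d =>
            ((mk <<< min d.natAbs (m + 1).toNat) ||| (mk >>> min d.natAbs (m + 1).toNat)) &&&
              ((1 <<< (m + 1).toNat) - 1)) mk).testBit j = true) ↔
          (j : Int) ∈ t.foldl (stepB m) F := by
  intro t
  induction t with
  | nil => intro mk F _ hmk j; exact hmk j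
  | cons d t ih =>
    intro mk F hF hmk j
    rw [List.foldl_cons, List.foldl_cons]
    exact ih _ (stepB m F d) (fun v hv => ((mem_stepB _ _ _ _).mp hv).1)
      (testBit_maskStep m hm mk F d hF hmk) j

-- B's fold over data[1:n] continues the frontier from Fr 1 to Fr n
theorem slice_foldl_eq_Fr (s m n : Int) (data : List Int) (hn : 1 ≤ n)
    (hlen : n ≤ (data.length : Int)) :
    (PySem.List.slice data (some 1) (some n)).foldl (stepB m)
      (stepB m [s] (data.getD 0 0)) = Fr s m data n.toNat := by
  cases data with
  | nil => simp at hlen; omega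
  | cons a t =>
    rw [PySem.List.slice_toNat _ (by omega) (by omega)]
    have h1 : ((1 : Int)).toNat = 1 := rfl
    rw [h1]
    have hFr := foldl_take_eq_Fr s m (a :: t) n.toNat (by omega)
    rw [show (a :: t).take n.toNat = a :: t.take (n.toNat - 1) by
      conv_lhs => rw [show n.toNat = (n.toNat - 1) + 1 by omega]
      rw [List.take_succ_cons]] at hFr
    rw [List.foldl_cons] at hFr
    show (t.take (n.toNat - 1)).foldl (stepB m) (stepB m [s] ((a :: t).getD 0 0)) = _
    rw [show (a :: t).getD 0 0 = a from rfl]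
    rw [show stepB m [s] a = stepB m (PySem.Set.ofList [s]) a from rfl]
    exact hFr

-- highest set bit of a nonzero number is bit size-1
theorem testBit_size_pred (mask : Nat) (h : mask ≠ 0) :
    mask.testBit (mask.size - 1) = true := by
  have h1 : 1 ≤ mask.size := by
    rcases Nat.eq_zero_or_pos mask.size with h0 | h0
    · exact absurd (Nat.size_eq_zero.mp h0) h
    · omega
  have hle : 2 ^ (mask.size - 1) ≤ mask := Nat.lt_size.mp (by omega)
  have hlt : mask < 2 ^ mask.size := Nat.lt_size_self mask
  have hdiv : mask / 2 ^ (mask.size - 1) = 1 := by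
    apply Nat.div_eq_of_lt_le (by simpa using hle)
    have hsz : mask.size = (mask.size - 1) + 1 := by omega
    calc mask < 2 ^ mask.size := hlt
      _ = (1 + 1) * 2 ^ (mask.size - 1) := by
          conv_lhs => rw [hsz, pow_succ]
          ring
  rw [Nat.testBit_eq_decide_div_mod_eq, hdiv]
  rfl

theorem lt_size_of_testBit (mask j : Nat) (h : mask.testBit j = true) : j < mask.size :=
  Nat.lt_size.mpr (Nat.ge_two_pow_of_testBit h)

-- ===== VERDICT (by name: the statement is the Claim_ definition above) =====
theorem solution_spec : Claim_equal_solution := by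
  intro n s m data _ hpre
  unfold Spec_solution
  by_cases hm : m < 0
  · rw [solution_m_neg n s m data hm]
    unfold solution_alt
    rw [if_pos (Or.inl hm)]
  · have hm0 : 0 ≤ m := by omega
    obtain ⟨hn, hlen⟩ : 1 ≤ n ∧ n ≤ (data.length : Int) := by
      cases hpre with
      | inl h => omega
      | inr h => exact h
    have hcast : ((n.toNat : Nat) : Int) = n := Int.toNat_of_nonneg (by omega)
    -- B's value
    unfold solution_alt
    rw [if_neg (by omega)]
    show _ = ((((PySem.List.slice data (some 1) (some n)).foldl
        (fun mk d =>
          ((mk <<< min d.natAbs (m + 1).toNat) ||| (mk >>> min d.natAbs (m + 1).toNat)) &&&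
            ((1 <<< (m + 1).toNat) - 1))
        ([s - ((PySem.List.pyGetD data 0 0).natAbs : Int),
          s + ((PySem.List.pyGetD data 0 0).natAbs : Int)].foldl
          (fun mk v => if 0 ≤ v ∧ v ≤ m then mk ||| (1 <<< v.toNat) else mk) 0)).size : Int) - 1)
    set mask := (PySem.List.slice data (some 1) (some n)).foldl
        (fun mk d =>
          ((mk <<< min d.natAbs (m + 1).toNat) ||| (mk >>> min d.natAbs (m + 1).toNat)) &&&
            ((1 <<< (m + 1).toNat) - 1))
        ([s - ((PySem.List.pyGetD data 0 0).natAbs : Int),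
          s + ((PySem.List.pyGetD data 0 0).natAbs : Int)].foldl
          (fun mk v => if 0 ≤ v ∧ v ≤ m then mk ||| (1 <<< v.toNat) else mk) 0) with hmaskdef
    -- the bits of mask are exactly the members of the final frontier
    have hmask : ∀ j : Nat, mask.testBit j = true ↔ (j : Int) ∈ Fr s m data n.toNat := by
      intro j
      rw [hmaskdef]
      have h0 : ∀ j : Nat,
          (([s - ((PySem.List.pyGetD data 0 0).natAbs : Int),
            s + ((PySem.List.pyGetD data 0 0).natAbs : Int)].foldl
            (fun mk v => if 0 ≤ v ∧ v ≤ m then mk ||| (1 <<< v.toNat) else mk) 0).testBit j = true)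
            ↔ (j : Int) ∈ stepB m [s] (data.getD 0 0) := by
        intro j
        rw [PySem.List.pyGetD_zero]
        exact testBit_mask0 s m (data.getD 0 0) j
      rw [testBit_foldl_mask m hm0 _ _ (stepB m [s] (data.getD 0 0))
        (fun v hv => ((mem_stepB _ _ _ _).mp hv).1) h0 j]
      rw [slice_foldl_eq_Fr s m n data hn hlen]
    -- A's value
    unfold solution
    show (match (PySem.List.pyRange m (-1) (-1)).foldl
        (fun acc j => match acc with
          | some r => some r
          | none => if tgetA ((PySem.List.pyRange 0 n 1).foldl
              (fun tb i => (PySem.List.pyRange 0 (m + 1) 1).foldl (bodyA s m data i) tb)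
              ((PySem.List.pyRange 0 n 1).map (fun _ => List.replicate (m + 1).toNat false)))
              (n - 1) j then some j else none) none with
      | some j => j | none => -1) = ((mask.size : Int) - 1)
    have htab : (PySem.List.pyRange 0 n 1).foldl
        (fun tb i => (PySem.List.pyRange 0 (m + 1) 1).foldl (bodyA s m data i) tb)
        ((PySem.List.pyRange 0 n 1).map (fun _ => List.replicate (m + 1).toNat false))
        = tableK s m n data n.toNat := by
      unfold tableK; rw [hcast]
    rw [htab, scan_eq_find]
    obtain ⟨hLen, hRows, h3, h4⟩ := outerA s m data n hn hlen n.toNat le_rfl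
    have hchar : ∀ j : Int, 0 ≤ j → j ≤ m →
        (tgetA (tableK s m n data n.toNat) (n - 1) j = true ↔ j ∈ Fr s m data n.toNat) := by
      intro j hj0 hjm
      have h := h3 (n.toNat - 1) (by omega) j hj0 hjm
      rw [show ((n.toNat - 1 : Nat) : Int) = n - 1 by omega] at h
      rw [show (n.toNat - 1) + 1 = n.toNat by omega] at h
      exact h
    have hFb := Fr_bounds s m data n.toNat (by omega)
    have hdesc := desc_find (fun j => tgetA (tableK s m n data n.toNat) (n - 1) j) m
    cases hfind : (PySem.List.pyRange m (-1) (-1)).find?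
        (fun j => tgetA (tableK s m n data n.toNat) (n - 1) j) with
    | none =>
      rw [hfind] at hdesc
      simp only [Option.elim] at hdesc
      have hzero : mask = 0 := by
        apply Nat.eq_of_testBit_eq
        intro i
        rw [Nat.zero_testBit]
        by_contra hbit
        rw [Bool.not_eq_false] at hbit
        have hi := (hmask i).mp hbit
        have hb := hFb _ hi
        have := (hchar (i : Int) hb.1 hb.2).mpr hi
        rw [hdesc (i : Int) hb.1 hb.2] at this
        simp at this
      rw [hzero]
      rfl
    | some jA =>
      rw [hfind] at hdesc
      simp only [Option.elim] at hdesc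
      obtain ⟨hpj, hj0, hjm, hmax⟩ := hdesc
      have hjF : jA ∈ Fr s m data n.toNat := (hchar jA hj0 hjm).mp hpj
      have hjA : jA.toNat = jA := by omega
      have hbitA : mask.testBit jA.toNat = true := (hmask jA.toNat).mpr (by
        rw [show ((jA.toNat : Nat) : Int) = jA by omega]; exact hjF)
      have hne0 : mask ≠ 0 := by
        intro h0
        rw [h0, Nat.zero_testBit] at hbitA
        exact absurd hbitA (by simp)
      have hsz1 : 1 ≤ mask.size := by
        rcases Nat.eq_zero_or_pos mask.size with h0 | h0
        · exact absurd (Nat.size_eq_zero.mp h0) hne0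
        · omega
      have hhigh : mask.testBit (mask.size - 1) = true := testBit_size_pred mask hne0
      have hkF : ((mask.size - 1 : Nat) : Int) ∈ Fr s m data n.toNat := (hmask _).mp hhigh
      have hkb := hFb _ hkF
      -- jA ≤ size - 1
      have hlt := lt_size_of_testBit mask jA.toNat hbitA
      -- size - 1 ≤ jA (else find? would have stopped higher)
      have hle : ((mask.size - 1 : Nat) : Int) ≤ jA := by
        by_contra hgt
        push_neg at hgt
        have := (hchar _ hkb.1 hkb.2).mpr hkF
        rw [hmax _ hgt hkb.2] at this
        simp at this
      show jA = (mask.size : Int) - 1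
      omega
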